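-- pv_equiv track=rewrite | github.com/uncmatteth/BeTheChad | app/utils/twitter_api.py | determine_chad_class
-- ===== SOURCE A (Python) =====
-- def determine_chad_class(keyword_counts, account_age=None, tweet_distribution=None, is_suspicious=False):
--     """Determine the user's Chad Class based on keyword frequencies and account behavior"""
--     # First handle special cases
--
--     # Format keyword_counts if it's the new format
--     if isinstance(keyword_counts, dict) and all(isinstance(v, dict) for v in keyword_counts.values()):
--         keyword_counts_simple = {k: v['count'] for k, v in keyword_counts.items()}
--     else:
--         keyword_counts_simple = keyword_counts
--
--     # 1. If suspicious pattern detected, assign Clown class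
--     if is_suspicious:
--         return "Clown"
--
--     # 2. If very new account with few tweets, assign Newbie class
--     if account_age is not None and account_age < 30:
--         return "Newbie"
--
--     # 3. Check for Blockchain Detective (rare class)
--     blockchain_detective_keywords = ['onchain', 'blockchain', 'detective', 'investigation', 'forensics', 'sleuth']
--     blockchain_detective_score = sum(keyword_counts_simple.get(keyword, 0) for keyword in blockchain_detective_keywords)
--
--     if blockchain_detective_score >= 10 and account_age and account_age > 365:
--         # Only assign if they have been active for over a year and have significant relevant content
--         return "Blockchain Detective"
--
--     # Define class criteria for regular classes
--     class_criteria = {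
--         'Meme Overlord': ['meme', 'pepe', 'wojak'],
--         'Crypto Knight': ['crypto', 'nft', 'hodl', 'moon'],
--         'Alpha Chad': ['alpha', 'chad', 'based'],
--         'Sigma Grindset': ['sigma', 'based', 'grind'],
--         'Ratio King': ['ratio', 'based', 'chad'],
--         'KOL': ['opinion', 'leader', 'influence', 'trend'],
--         'Tech Bro': ['startup', 'disrupt', 'scale', 'tech'],
--         'Gym Rat': ['gym', 'protein', 'lift', 'gains'],
--         'Debate Lord': ['debate', 'argument', 'logic', 'fallacy'],
--         'Diamond Hands': ['hodl', 'diamond', 'hands', 'hold'],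
--         'Lore Master': ['lore', 'history', 'knowledge', 'facts']
--     }
--
--     # Score each class
--     class_scores = {}
--     for class_name, keywords in class_criteria.items():
--         score = sum(keyword_counts_simple.get(keyword, 0) for keyword in keywords)
--
--         # Apply tweet distribution factor if available
--         if tweet_distribution is not None:
--             score *= tweet_distribution
--
--         class_scores[class_name] = score
--
--     # Find the highest scoring class
--     top_class = max(class_scores.items(), key=lambda x: x[1])
--
--     # Default to "Normie Chad" if no strong class preference
--     if top_class[1] < 3:
--         return "Normie Chad"
--
--     return top_class[0]
-- ===== SOURCE B (Python) =====
-- CLASS_CRITERIA = {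
--     'Meme Overlord': ['meme', 'pepe', 'wojak'],
--     'Crypto Knight': ['crypto', 'nft', 'hodl', 'moon'],
--     'Alpha Chad': ['alpha', 'chad', 'based'],
--     'Sigma Grindset': ['sigma', 'based', 'grind'],
--     'Ratio King': ['ratio', 'based', 'chad'],
--     'KOL': ['opinion', 'leader', 'influence', 'trend'],
--     'Tech Bro': ['startup', 'disrupt', 'scale', 'tech'],
--     'Gym Rat': ['gym', 'protein', 'lift', 'gains'],
--     'Debate Lord': ['debate', 'argument', 'logic', 'fallacy'],
--     'Diamond Hands': ['hodl', 'diamond', 'hands', 'hold'],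
--     'Lore Master': ['lore', 'history', 'knowledge', 'facts']
-- }
--
-- # Inverted index: keyword -> list of class names it contributes to
-- KEYWORD_INDEX = {}
-- for _cls, _kws in CLASS_CRITERIA.items():
--     for _kw in _kws:
--         KEYWORD_INDEX.setdefault(_kw, []).append(_cls)
--
-- BLOCKCHAIN_DETECTIVE_KEYWORDS = ['onchain', 'blockchain', 'detective', 'investigation', 'forensics', 'sleuth']
--
--
-- def determine_chad_class(keyword_counts, account_age=None, tweet_distribution=None, is_suspicious=False):
--     """Determine the user's Chad Class via an inverted keyword->classes index."""
--     if is_suspicious: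
--         return "Clown"
--
--     if account_age is not None and account_age < 30:
--         return "Newbie"
--
--     # Normalize the new nested format to simple counts
--     if isinstance(keyword_counts, dict) and all(isinstance(v, dict) for v in keyword_counts.values()):
--         counts = {k: v['count'] for k, v in keyword_counts.items()}
--     else:
--         counts = keyword_counts
--
--     blockchain_detective_score = sum(counts.get(k, 0) for k in BLOCKCHAIN_DETECTIVE_KEYWORDS)
--     if blockchain_detective_score >= 10 and account_age and account_age > 365:
--         return "Blockchain Detective"
--
--     # One pass over the user's counts, scattering into per-class scores
--     scores = {cls: 0 for cls in CLASS_CRITERIA}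
--     for kw, n in counts.items():
--         for cls in KEYWORD_INDEX.get(kw, ()):
--             scores[cls] += n
--
--     if tweet_distribution is not None:
--         scores = {cls: s * tweet_distribution for cls, s in scores.items()}
--
--     best_cls, best_score = max(scores.items(), key=lambda x: x[1])
--     if best_score < 3:
--         return "Normie Chad"
--     return best_cls
-- ===== Notes on version B (the rewrite author's own statement) =====
-- stated objective: alternative
-- what changed: Replaces A's per-class inner loops of dict lookups over each class's keyword list by a precomputed inverted keyword-to-classes index and a single scatter pass over the user's keyword counts that accumulates all class scores at once; Pre_ excludes only association lists with duplicate keys, which never arise from a Python dict.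
import Mathlib
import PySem

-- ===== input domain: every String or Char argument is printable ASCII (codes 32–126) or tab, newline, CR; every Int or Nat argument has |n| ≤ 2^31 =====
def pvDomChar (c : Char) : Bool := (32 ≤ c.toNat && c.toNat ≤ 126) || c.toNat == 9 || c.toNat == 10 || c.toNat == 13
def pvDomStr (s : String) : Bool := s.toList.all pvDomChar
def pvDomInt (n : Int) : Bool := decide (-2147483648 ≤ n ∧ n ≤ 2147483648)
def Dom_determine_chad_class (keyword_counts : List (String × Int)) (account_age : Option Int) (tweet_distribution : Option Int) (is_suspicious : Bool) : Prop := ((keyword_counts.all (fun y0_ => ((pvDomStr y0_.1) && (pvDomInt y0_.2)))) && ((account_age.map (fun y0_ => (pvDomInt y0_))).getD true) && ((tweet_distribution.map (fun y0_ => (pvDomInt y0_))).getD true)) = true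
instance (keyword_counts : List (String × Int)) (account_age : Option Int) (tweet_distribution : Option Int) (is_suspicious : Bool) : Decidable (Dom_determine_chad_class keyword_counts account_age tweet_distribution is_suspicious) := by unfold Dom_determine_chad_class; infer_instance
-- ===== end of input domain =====

-- B replaces A's per-class sums of dict lookups by a precomputed inverted keyword→classes index and a
-- single scatter pass over the user's counts (objective: alternative decomposition, same cost class).

-- ===== PORT A =====
def dcc_bd_keywords : List String :=
  ["onchain", "blockchain", "detective", "investigation", "forensics", "sleuth"]

def dcc_class_criteria : List (String × List String) :=
  [("Meme Overlord", ["meme", "pepe", "wojak"]),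
   ("Crypto Knight", ["crypto", "nft", "hodl", "moon"]),
   ("Alpha Chad", ["alpha", "chad", "based"]),
   ("Sigma Grindset", ["sigma", "based", "grind"]),
   ("Ratio King", ["ratio", "based", "chad"]),
   ("KOL", ["opinion", "leader", "influence", "trend"]),
   ("Tech Bro", ["startup", "disrupt", "scale", "tech"]),
   ("Gym Rat", ["gym", "protein", "lift", "gains"]),
   ("Debate Lord", ["debate", "argument", "logic", "fallacy"]),
   ("Diamond Hands", ["hodl", "diamond", "hands", "hold"]),
   ("Lore Master", ["lore", "history", "knowledge", "facts"])]

-- A's 'Score each class' loop, named so the proofs can talk about it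
def dcc_scoresA (counts : PySem.Dict String Int) (tweet_distribution : Option Int) : PySem.Dict String Int :=
  dcc_class_criteria.foldl (fun d p =>
    let score := (p.2.map (fun k => counts.getD k 0)).sum
    let score := match tweet_distribution with | some t => score * t | none => score
    d.insert p.1 score) PySem.Dict.empty

def determine_chad_class (keyword_counts : List (String × Int)) (account_age : Option Int) (tweet_distribution : Option Int) (is_suspicious : Bool) : String :=
  -- keyword_counts is a dict of int counts, so Python's nested-format normalisation is the
  -- identity here (and on the empty dict both branches yield the empty dict): keyword_counts_simple = keyword_counts
  let counts : PySem.Dict String Int := PySem.Dict.mk keyword_counts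
  if is_suspicious then "Clown"
  else if (match account_age with | some a => decide (a < 30) | none => false) then "Newbie"
  else
    let blockchain_detective_score := (dcc_bd_keywords.map (fun k => counts.getD k 0)).sum
    -- 'account_age and account_age > 365': truthiness of the int, then the comparison
    if blockchain_detective_score ≥ 10 &&
       (match account_age with | some a => decide (a ≠ 0) && decide (a > 365) | none => false) then
      "Blockchain Detective"
    else
      let class_scores := dcc_scoresA counts tweet_distribution
      match PySem.List.max? class_scores.items (fun x => x.2) with
      | some top => if top.2 < 3 then "Normie Chad" else top.1
      | none => "Normie Chad"   -- unreachable: class_scores always has 11 entries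

-- ===== PORT B =====
-- module-level inverted index: keyword -> class names it contributes to (built once from the criteria)
def dcc_keyword_index : PySem.Dict String (List String) :=
  dcc_class_criteria.foldl (fun d p =>
    p.2.foldl (fun d kw => d.modify kw [] (fun l => l ++ [p.1])) d) PySem.Dict.empty

-- B's scores initialisation and single scatter pass, named so the proofs can talk about them
def dcc_scores0 : PySem.Dict String Int :=
  dcc_class_criteria.foldl (fun d p => d.insert p.1 0) PySem.Dict.empty

def dcc_scatter (counts : PySem.Dict String Int) : PySem.Dict String Int :=
  counts.items.foldl (fun d p =>
    (dcc_keyword_index.getD p.1 []).foldl (fun d c => d.modify c 0 (fun s => s + p.2)) d) dcc_scores0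

def determine_chad_class_alt (keyword_counts : List (String × Int)) (account_age : Option Int) (tweet_distribution : Option Int) (is_suspicious : Bool) : String :=
  if is_suspicious then "Clown"
  else if (match account_age with | some a => decide (a < 30) | none => false) then "Newbie"
  else
    -- normalisation of the nested format is the identity on a dict of int counts: counts = keyword_counts
    let counts : PySem.Dict String Int := PySem.Dict.mk keyword_counts
    let blockchain_detective_score := (dcc_bd_keywords.map (fun k => counts.getD k 0)).sum
    if blockchain_detective_score ≥ 10 &&
       (match account_age with | some a => decide (a ≠ 0) && decide (a > 365) | none => false) then
      "Blockchain Detective"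
    else
      let scores1 := dcc_scatter counts
      let scores : PySem.Dict String Int :=
        match tweet_distribution with
        | some t => PySem.Dict.mk (scores1.items.map (fun x => (x.1, x.2 * t)))
        | none => scores1
      match PySem.List.max? scores.items (fun x => x.2) with
      | some top => if top.2 < 3 then "Normie Chad" else top.1
      | none => "Normie Chad"   -- unreachable: scores always has 11 entries

-- ===== PRECONDITION & SPEC =====
-- Pre_ excludes association lists with duplicate keys: they do not arise from a Python dict, and on them
-- A's first-match lookups and B's pass over all items are both accidental readings of a malformed dict.
def Pre_determine_chad_class (keyword_counts : List (String × Int)) (account_age : Option Int) (tweet_distribution : Option Int) (is_suspicious : Bool) : Prop :=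
  (keyword_counts.map Prod.fst).Nodup
instance (keyword_counts : List (String × Int)) (account_age : Option Int) (tweet_distribution : Option Int) (is_suspicious : Bool) : Decidable (Pre_determine_chad_class keyword_counts account_age tweet_distribution is_suspicious) := by unfold Pre_determine_chad_class; infer_instance

def pvWitness_determine_chad_class : (List (String × Int)) × Option Int × Option Int × Bool :=
  ([("meme", 5), ("gym", 1)], some 100, none, false)

def Spec_determine_chad_class (keyword_counts : List (String × Int)) (account_age : Option Int) (tweet_distribution : Option Int) (is_suspicious : Bool) (out : String) : Prop := out = determine_chad_class_alt keyword_counts account_age tweet_distribution is_suspicious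
instance (keyword_counts : List (String × Int)) (account_age : Option Int) (tweet_distribution : Option Int) (is_suspicious : Bool) (out : String) : Decidable (Spec_determine_chad_class keyword_counts account_age tweet_distribution is_suspicious out) := by unfold Spec_determine_chad_class; infer_instance

-- ===== CLAIM (what is proved, stated in full; the proofs are below) =====
def Claim_equal_determine_chad_class : Prop := ∀ (keyword_counts : List (String × Int)) (account_age : Option Int) (tweet_distribution : Option Int) (is_suspicious : Bool), Dom_determine_chad_class keyword_counts account_age tweet_distribution is_suspicious → Pre_determine_chad_class keyword_counts account_age tweet_distribution is_suspicious → Spec_determine_chad_class keyword_counts account_age tweet_distribution is_suspicious (determine_chad_class keyword_counts account_age tweet_distribution is_suspicious)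

-- ===== LEMMAS AND PROOFS =====
-- class names, in criteria order
def dcc_class_names : List String := dcc_class_criteria.map Prod.fst

-- closed facts about the static tables
lemma dcc_names_nodup : dcc_class_names.Nodup := by decide

lemma dcc_kws_nodup : ∀ p ∈ dcc_class_criteria, p.2.Nodup := by decide

set_option maxRecDepth 8192 in
lemma dcc_index_items_facts :
    ∀ pr ∈ dcc_keyword_index.items, pr.2.Nodup ∧ ∀ c ∈ pr.2, c ∈ dcc_class_names := by decide

lemma dcc_index_getD_nodup (k : String) : (dcc_keyword_index.getD k []).Nodup := by
  rw [PySem.Dict.getD_eq_get?_getD]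
  cases h : dcc_keyword_index.get? k with
  | none => simp
  | some v =>
    have := dcc_index_items_facts _ (PySem.Dict.mem_items_of_get?_eq_some _ h)
    simpa using this.1

lemma dcc_index_getD_sub (k : String) : ∀ c ∈ dcc_keyword_index.getD k [], c ∈ dcc_class_names := by
  rw [PySem.Dict.getD_eq_get?_getD]
  cases h : dcc_keyword_index.get? k with
  | none => simp
  | some v =>
    have := dcc_index_items_facts _ (PySem.Dict.mem_items_of_get?_eq_some _ h)
    simpa using this.2

-- correspondence between the inverted index and the criteria
set_option maxRecDepth 8192 in
lemma dcc_index_iff (p : String × List String) (hp : p ∈ dcc_class_criteria) (k : String) :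
    p.1 ∈ dcc_keyword_index.getD k [] ↔ k ∈ p.2 := by
  by_cases hk : k ∈ dcc_keyword_index.keys
  · revert hp
    have hmem : ∀ k' ∈ dcc_keyword_index.keys, ∀ q ∈ dcc_class_criteria,
        (q.1 ∈ dcc_keyword_index.getD k' []) ↔ k' ∈ q.2 := by decide
    exact fun hp => hmem k hk p hp
  · have h1 : dcc_keyword_index.getD k [] = [] := by
      apply PySem.Dict.getD_of_not_contains
      rw [PySem.Dict.contains_eq_decide_mem_keys]
      simp [hk]
    have h2 : k ∉ p.2 := by
      have hsub : ∀ q ∈ dcc_class_criteria, ∀ k' ∈ q.2, k' ∈ dcc_keyword_index.keys := by decide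
      exact fun hmem => hk (hsub p hp k hmem)
    simp [h1, h2]

-- first-match lookup in the counts dict as a sum over the (Nodup-keyed) item list
lemma sum_indicator_zero {l : List (String × Int)} {k : String}
    (h : k ∉ l.map Prod.fst) : (l.map (fun q => if q.1 = k then q.2 else 0)).sum = 0 := by
  apply List.sum_eq_zero
  intro x hx
  simp only [List.mem_map] at hx
  obtain ⟨q, hq, rfl⟩ := hx
  have : q.1 ≠ k := fun he => h (he ▸ List.mem_map_of_mem hq)
  simp [this]

lemma getD_mk_eq_sum (l : List (String × Int)) (k : String) (h : (l.map Prod.fst).Nodup) :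
    (PySem.Dict.mk l).getD k 0 = (l.map (fun q => if q.1 = k then q.2 else 0)).sum := by
  induction l with
  | nil => simp [PySem.Dict.getD_eq_get?_getD, PySem.Dict.get?]
  | cons q t ih =>
    simp only [List.map_cons, List.nodup_cons] at h
    rw [PySem.Dict.getD_eq_get?_getD, PySem.Dict.get?_mk_cons]
    by_cases he : q.1 = k
    · subst he
      simp [sum_indicator_zero h.1]
    · have : (q.1 == k) = false := by simp [he]
      rw [this]
      simp only [Bool.false_eq_true, if_false, List.map_cons, List.sum_cons, if_neg he, zero_add]
      rw [← PySem.Dict.getD_eq_get?_getD]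
      exact ih h.2

lemma sum_indicator_mem (kws : List String) (a : String) (v : Int) (h : kws.Nodup) :
    (kws.map (fun k => if a = k then v else 0)).sum = if a ∈ kws then v else 0 := by
  induction kws with
  | nil => simp
  | cons k t ih =>
    simp only [List.nodup_cons] at h
    by_cases he : a = k
    · subst he
      have : ∀ x ∈ t.map (fun k => if a = k then v else 0), x = 0 := by
        intro x hx
        simp only [List.mem_map] at hx
        obtain ⟨k', hk', rfl⟩ := hx
        have : a ≠ k' := fun hek => h.1 (hek ▸ hk')
        simp [this]
      simp [List.sum_eq_zero this]
    · simp only [List.map_cons, List.sum_cons, if_neg he, zero_add, List.mem_cons]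
      rw [ih h.2]
      simp [he]

-- the sum-order swap: per-keyword dict lookups = per-item membership indicator
lemma sum_lookups_eq_scatter (kws : List String) (hkws : kws.Nodup)
    (l : List (String × Int)) (hl : (l.map Prod.fst).Nodup) :
    (kws.map (fun k => (PySem.Dict.mk l).getD k 0)).sum
      = (l.map (fun q => if q.1 ∈ kws then q.2 else 0)).sum := by
  have h1 : (kws.map (fun k => (PySem.Dict.mk l).getD k 0)).sum
      = (kws.map (fun k => (l.map (fun q => if q.1 = k then q.2 else 0)).sum)).sum := by
    congr 1
    exact List.map_congr_left (fun k _ => getD_mk_eq_sum l k hl)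
  rw [h1]; clear h1 hl
  induction l with
  | nil => simp [List.sum_eq_zero]
  | cons q t ih =>
    simp only [List.map_cons, List.sum_cons]
    rw [PySem.List.sum_map_add_int, ih, sum_indicator_mem kws q.1 q.2 hkws]

-- value of the inner scatter fold
lemma inner_getD (cs : List String) (hnd : cs.Nodup) (v : Int) (d : PySem.Dict String Int) (c : String) :
    (cs.foldl (fun d c' => d.modify c' 0 (fun s => s + v)) d).getD c 0
      = d.getD c 0 + (if c ∈ cs then v else 0) := by
  induction cs generalizing d with
  | nil => simp
  | cons c' t ih =>
    simp only [List.nodup_cons] at hnd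
    simp only [List.foldl_cons]
    rw [ih hnd.2, PySem.Dict.getD_modify]
    by_cases he : c = c'
    · subst he
      simp [hnd.1]
    · simp [he]

-- value of the outer scatter fold
lemma outer_getD (l : List (String × Int)) (d : PySem.Dict String Int) (c : String) :
    (l.foldl (fun d p =>
        (dcc_keyword_index.getD p.1 []).foldl (fun d c' => d.modify c' 0 (fun s => s + p.2)) d) d).getD c 0
      = d.getD c 0 + (l.map (fun p => if c ∈ dcc_keyword_index.getD p.1 [] then p.2 else 0)).sum := by
  induction l generalizing d with
  | nil => simp
  | cons p t ih =>
    simp only [List.foldl_cons, List.map_cons, List.sum_cons]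
    rw [ih, inner_getD _ (dcc_index_getD_nodup p.1)]
    ring

-- keys are preserved by the scatter folds
lemma inner_keys (cs : List String) (v : Int) (d : PySem.Dict String Int)
    (h : ∀ c ∈ cs, d.contains c = true) :
    (cs.foldl (fun d c' => d.modify c' 0 (fun s => s + v)) d).keys = d.keys := by
  induction cs generalizing d with
  | nil => rfl
  | cons c' t ih =>
    simp only [List.foldl_cons]
    have hc' : d.contains c' = true := h c' (List.mem_cons_self ..)
    have hk : (d.modify c' 0 (fun s => s + v)).keys = d.keys := by
      rw [PySem.Dict.keys_modify, PySem.Dict.keys_insert_of_contains _ _ hc']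
    rw [ih _ (fun c hc => by rw [PySem.Dict.contains_modify]; simp [h c (List.mem_cons_of_mem _ hc)]), hk]

lemma outer_keys (l : List (String × Int)) (d : PySem.Dict String Int)
    (h : d.keys = dcc_class_names) :
    (l.foldl (fun d p =>
        (dcc_keyword_index.getD p.1 []).foldl (fun d c' => d.modify c' 0 (fun s => s + p.2)) d) d).keys
      = dcc_class_names := by
  induction l generalizing d with
  | nil => exact h
  | cons p t ih =>
    simp only [List.foldl_cons]
    apply ih
    rw [inner_keys _ _ _ (fun c hc => by
      rw [PySem.Dict.contains_eq_decide_mem_keys, h]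
      simp [dcc_index_getD_sub p.1 c hc]), h]

-- A's scores loop (fresh distinct keys) produces the mapped items list; one lemma per td branch
set_option maxRecDepth 8192 in
lemma scoresA_items_none (counts : PySem.Dict String Int) :
    (dcc_scoresA counts none).items
      = dcc_class_criteria.map (fun p => (p.1, (p.2.map (fun k => counts.getD k 0)).sum)) := by
  show (dcc_class_criteria.foldl (fun d p =>
      d.insert p.1 ((p.2.map (fun k => counts.getD k 0)).sum)) PySem.Dict.empty).items = _
  have := PySem.Dict.items_foldl_insert_fresh dcc_class_criteria (fun p => p.1)
    (fun p => (p.2.map (fun k => counts.getD k 0)).sum)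
    PySem.Dict.empty (by intro a _; rfl) (by decide)
  simpa using this

set_option maxRecDepth 8192 in
lemma scoresA_items_some (counts : PySem.Dict String Int) (t : Int) :
    (dcc_scoresA counts (some t)).items
      = dcc_class_criteria.map (fun p => (p.1, (p.2.map (fun k => counts.getD k 0)).sum * t)) := by
  show (dcc_class_criteria.foldl (fun d p =>
      d.insert p.1 ((p.2.map (fun k => counts.getD k 0)).sum * t)) PySem.Dict.empty).items = _
  have := PySem.Dict.items_foldl_insert_fresh dcc_class_criteria (fun p => p.1)
    (fun p => (p.2.map (fun k => counts.getD k 0)).sum * t)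
    PySem.Dict.empty (by intro a _; rfl) (by decide)
  simpa using this

set_option maxRecDepth 8192 in
lemma scores0_items :
    dcc_scores0.items = dcc_class_criteria.map (fun p => (p.1, (0 : Int))) := by
  have := PySem.Dict.items_foldl_insert_fresh dcc_class_criteria (fun p => p.1)
    (fun _ => (0 : Int)) PySem.Dict.empty (by intro a _; rfl) (by decide)
  simpa [dcc_scores0] using this

-- B's scatter result, itemised
set_option maxRecDepth 8192 in
lemma scatter_items (l : List (String × Int)) :
    (dcc_scatter (PySem.Dict.mk l)).items
      = dcc_class_names.map (fun c =>
          (c, (l.map (fun p => if c ∈ dcc_keyword_index.getD p.1 [] then p.2 else 0)).sum)) := by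
  have hkeys0 : dcc_scores0.keys = dcc_class_names := by
    show dcc_scores0.items.map Prod.fst = _
    rw [scores0_items]
    simp [dcc_class_names]
  have hkeys : (dcc_scatter (PySem.Dict.mk l)).keys = dcc_class_names := by
    unfold dcc_scatter
    exact outer_keys l dcc_scores0 hkeys0
  unfold dcc_scatter at hkeys ⊢
  rw [PySem.Dict.items_eq_map_keys _ (hkeys ▸ dcc_names_nodup) 0, hkeys]
  apply List.map_congr_left
  intro c hc
  rw [outer_getD]
  have h0 : dcc_scores0.getD c 0 = 0 := by
    apply PySem.Dict.getD_of_mem_items _ _ (hkeys0 ▸ dcc_names_nodup)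
    rw [scores0_items]
    simp only [dcc_class_names, List.mem_map] at hc ⊢
    obtain ⟨p, hp, rfl⟩ := hc
    exact ⟨p, hp, rfl⟩
  rw [h0, zero_add]

-- per class: A's per-keyword lookups equal B's scatter contribution
lemma class_sum_eq (p : String × List String) (hp : p ∈ dcc_class_criteria)
    (l : List (String × Int)) (h : (l.map Prod.fst).Nodup) :
    (p.2.map (fun k => (PySem.Dict.mk l).getD k 0)).sum
      = (l.map (fun q => if p.1 ∈ dcc_keyword_index.getD q.1 [] then q.2 else 0)).sum := by
  rw [sum_lookups_eq_scatter p.2 (dcc_kws_nodup p hp) l h]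
  refine congrArg List.sum (List.map_congr_left ?_)
  intro q _
  by_cases hm : q.1 ∈ p.2
  · rw [if_pos hm, if_pos ((dcc_index_iff p hp q.1).mpr hm)]
  · rw [if_neg hm, if_neg (fun hc => hm ((dcc_index_iff p hp q.1).mp hc))]

-- the two final score dicts coincide on a Nodup-keyed counts dict
lemma scores_eq (kc : List (String × Int)) (td : Option Int) (h : (kc.map Prod.fst).Nodup) :
    dcc_scoresA (PySem.Dict.mk kc) td
      = (match td with
         | some t => PySem.Dict.mk ((dcc_scatter (PySem.Dict.mk kc)).items.map (fun x => (x.1, x.2 * t)))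
         | none => dcc_scatter (PySem.Dict.mk kc)) := by
  cases td with
  | none =>
    apply PySem.Dict.ext
    rw [scoresA_items_none, scatter_items]
    simp only [dcc_class_names, List.map_map]
    exact List.map_congr_left (fun p hp => by
      simp only [Function.comp]
      rw [class_sum_eq p hp kc h])
  | some t =>
    apply PySem.Dict.ext
    show _ = ((dcc_scatter (PySem.Dict.mk kc)).items.map (fun x => (x.1, x.2 * t)))
    rw [scoresA_items_some, scatter_items, List.map_map]
    simp only [dcc_class_names, List.map_map]
    exact List.map_congr_left (fun p hp => by
      simp only [Function.comp]
      rw [class_sum_eq p hp kc h])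

-- ===== VERDICT (by name: the statement is the Claim_ definition above) =====
set_option maxRecDepth 8192 in
theorem determine_chad_class_spec : Claim_equal_determine_chad_class := by
  intro keyword_counts account_age tweet_distribution is_suspicious _ hpre
  unfold Spec_determine_chad_class determine_chad_class determine_chad_class_alt
  cases is_suspicious with
  | true => exact Eq.trans (rfl : _ = "Clown") rfl
  | false =>
    simp only [Bool.false_eq_true, if_false]
    cases account_age with
    | none =>
      simp only [Bool.and_false, Bool.false_eq_true, if_false]
      rw [scores_eq keyword_counts tweet_distribution hpre]
    | some a =>
      simp only []
      by_cases h2 : (decide (a < 30) = true)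
      · rw [if_pos h2, if_pos h2]
      · rw [if_neg h2, if_neg h2]
        by_cases h3 : ((decide ((dcc_bd_keywords.map (fun k => (PySem.Dict.mk keyword_counts).getD k 0)).sum ≥ 10) && (decide (a ≠ 0) && decide (a > 365))) = true)
        · rw [if_pos h3, if_pos h3]
        · rw [if_neg h3, if_neg h3, scores_eq keyword_counts tweet_distribution hpre]
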